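-- pv_equiv track=rewrite | github.com/DanLoad17/ECE1786 | a1/BACKUP/A1P3_5.py | tokenize_and_preprocess_text
-- ===== SOURCE A (Python) =====
-- def tokenize_and_preprocess_text(textlist, v2i, window):
--     X, Y = [], []
--     half_window = window // 2
--     n = len(textlist)
--     for i, word in enumerate(textlist):
--         if word not in v2i:
--             raise KeyError(f"Word '{word}' not in v2i")
--         target_idx = v2i[word]
--         left = max(0, i - half_window)
--         right = min(n - 1, i + half_window)
--         for j in range(left, right + 1):
--             if j == i:
--                 continue
--             context_word = textlist[j]
--             if context_word not in v2i:
--                 raise KeyError(f"Word '{context_word}' not in v2i")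
--             context_idx = v2i[context_word]
--             X.append(target_idx)
--             Y.append(context_idx)
--     return X, Y
-- ===== SOURCE B (Python) =====
-- def tokenize_and_preprocess_text(textlist, v2i, window):
--     # pass 1: validate and index every word (leftmost missing word raises,
--     # matching A because A checks each word as a target, left to right)
--     for w in textlist:
--         if w not in v2i:
--             raise KeyError(f"Word '{w}' not in v2i")
--     idx = [v2i[w] for w in textlist]
--     half = max(0, window // 2)
--     n = len(idx)
--     X, Y = [], []
--     for i, t in enumerate(idx):
--         ctx = idx[max(0, i - half):i] + idx[i + 1:min(n - 1, i + half) + 1]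
--         X += [t] * len(ctx)
--         Y += ctx
--     return X, Y
-- ===== Notes on version B (the rewrite author's own statement) =====
-- stated objective: alternative
-- what changed: B separates validation/indexing (one linear pass mapping every word through v2i, raising on the leftmost missing word) from pair generation, and emits each target's context block at once via list slicing and replication instead of A's interleaved per-j inner loop with membership re-checks.
import Mathlib
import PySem

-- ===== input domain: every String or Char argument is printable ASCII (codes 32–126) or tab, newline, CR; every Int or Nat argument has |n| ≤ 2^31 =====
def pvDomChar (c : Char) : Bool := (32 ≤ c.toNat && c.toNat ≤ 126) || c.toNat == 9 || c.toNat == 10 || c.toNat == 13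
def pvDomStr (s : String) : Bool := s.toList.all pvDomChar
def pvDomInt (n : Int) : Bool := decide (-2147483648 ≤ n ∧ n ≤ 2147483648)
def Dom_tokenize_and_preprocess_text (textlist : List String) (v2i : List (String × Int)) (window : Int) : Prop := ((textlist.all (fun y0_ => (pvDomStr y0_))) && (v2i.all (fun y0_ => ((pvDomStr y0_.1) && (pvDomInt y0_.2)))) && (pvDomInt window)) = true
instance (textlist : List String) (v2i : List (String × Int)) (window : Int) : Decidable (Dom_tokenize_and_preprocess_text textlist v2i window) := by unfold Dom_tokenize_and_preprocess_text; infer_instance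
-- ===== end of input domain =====

-- B separates validation/indexing from pair generation and emits each context block by list slicing; alternative decomposition, same cost.

-- ===== PORT A =====
-- dict lookup (first match) for v2i[word]; the default is reached only where Python raised (excluded by Pre_)
def pvLookup (v2i : List (String × Int)) (w : String) : Int :=
  ((v2i.find? (fun p => p.1 == w)).map (·.2)).getD 0

def tokenize_and_preprocess_text (textlist : List String) (v2i : List (String × Int)) (window : Int) : List Int × List Int :=
  let half_window := PySem.Int.floordiv window 2
  let n : Int := textlist.length
  (PySem.List.enumerate textlist).foldl (fun XY iw =>
    let i := iw.1
    let word := iw.2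
    -- 'if word not in v2i: raise KeyError' — raising inputs are outside Pre_
    let target_idx := pvLookup v2i word
    let left := max 0 (i - half_window)
    let right := min (n - 1) (i + half_window)
    (PySem.List.pyRange left (right + 1) 1).foldl (fun XY j =>
      if j == i then XY
      else
        -- the context membership re-check raises only outside Pre_
        let context_word := (PySem.List.pyGet? textlist j).getD ""
        let context_idx := pvLookup v2i context_word
        (XY.1 ++ [target_idx], XY.2 ++ [context_idx])) XY) ([], [])

-- ===== PORT B =====
def tokenize_and_preprocess_text_alt (textlist : List String) (v2i : List (String × Int)) (window : Int) : List Int × List Int :=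
  -- validation pass 'for w: if w not in v2i: raise' only raises, which is outside Pre_; the
  -- indexing comprehension is the map below
  let idx := textlist.map (fun w => pvLookup v2i w)
  let half := max 0 (PySem.Int.floordiv window 2)
  let n : Int := idx.length
  (PySem.List.enumerate idx).foldl (fun XY it =>
    let i := it.1
    let t := it.2
    let ctx := PySem.List.slice idx (some (max 0 (i - half))) (some i)
            ++ PySem.List.slice idx (some (i + 1)) (some (min (n - 1) (i + half) + 1))
    (XY.1 ++ List.replicate ctx.length t, XY.2 ++ ctx)) ([], [])

-- ===== PRECONDITION & SPEC =====
-- Pre_ excludes exactly the inputs on which A raises KeyError (some word of textlist is not a key of v2i); B raises identically there.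
def Pre_tokenize_and_preprocess_text (textlist : List String) (v2i : List (String × Int)) (window : Int) : Prop :=
  textlist.all (fun w => v2i.any (fun p => p.1 == w)) = true
instance (textlist : List String) (v2i : List (String × Int)) (window : Int) : Decidable (Pre_tokenize_and_preprocess_text textlist v2i window) := by unfold Pre_tokenize_and_preprocess_text; infer_instance

def pvWitness_tokenize_and_preprocess_text : List String × (List (String × Int)) × Int :=
  (["a", "b", "a"], [("a", 0), ("b", 1)], 2)

def Spec_tokenize_and_preprocess_text (textlist : List String) (v2i : List (String × Int)) (window : Int) (out : List Int × List Int) : Prop := out = tokenize_and_preprocess_text_alt textlist v2i window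
instance (textlist : List String) (v2i : List (String × Int)) (window : Int) (out : List Int × List Int) : Decidable (Spec_tokenize_and_preprocess_text textlist v2i window out) := by unfold Spec_tokenize_and_preprocess_text; infer_instance

-- ===== CLAIM (what is proved, stated in full; the proofs are below) =====
def Claim_equal_tokenize_and_preprocess_text : Prop := ∀ (textlist : List String) (v2i : List (String × Int)) (window : Int), Dom_tokenize_and_preprocess_text textlist v2i window → Pre_tokenize_and_preprocess_text textlist v2i window → Spec_tokenize_and_preprocess_text textlist v2i window (tokenize_and_preprocess_text textlist v2i window)

-- ===== LEMMAS AND PROOFS =====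

-- A's inner loop (skip j = i, append target/context) as appended maps over the filtered range
theorem innerA (js : List Int) (i t : Int) (g : Int → Int) (XY : List Int × List Int) :
    js.foldl (fun XY j => if j == i then XY else (XY.1 ++ [t], XY.2 ++ [g j])) XY
    = (XY.1 ++ (js.filter (fun j => !(j == i))).map (fun _ => t),
       XY.2 ++ (js.filter (fun j => !(j == i))).map g) := by
  induction js generalizing XY with
  | nil => simp
  | cons x xs ih =>
    simp only [List.foldl_cons, List.filter_cons]
    by_cases h : x = i
    · simp only [h, beq_self_eq_true, if_pos, Bool.not_true]
      rw [ih]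
      simp
    · have hb : (x == i) = false := by simp [h]
      simp only [hb, Bool.not_false, if_true]
      rw [ih]
      simp [List.append_assoc]

-- a nonnegative in-bounds slice is the range of its indices read through pyGetD
theorem slice_eq_map_pyRange {α : Type} [Inhabited α] (xs : List α) (a b : Int) (d : α)
    (ha : 0 ≤ a) (hb0 : 0 ≤ b) (hb : b ≤ xs.length) :
    PySem.List.slice xs (some a) (some b)
    = (PySem.List.pyRange a b 1).map (fun j => PySem.List.pyGetD xs j d) := by
  by_cases h : b ≤ a
  · rw [PySem.List.pyRange_one_eq_nil h, PySem.List.slice_toNat xs ha hb0]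
    have : b.toNat - a.toNat = 0 := by omega
    simp [this]
  · replace h : a < b := by omega
    apply List.ext_getElem
    · rw [PySem.List.slice_toNat xs ha hb0, List.length_map, PySem.List.length_pyRange_one,
        List.length_take, List.length_drop]
      omega
    · intro k h1 h2
      rw [PySem.List.slice_toNat xs ha hb0] at h1
      simp only [PySem.List.slice_toNat xs ha hb0, List.getElem_take, List.getElem_drop,
        List.getElem_map, PySem.List.getElem_pyRange_one]
      simp only [List.length_take, List.length_drop] at h1
      have hk : k < (b - a).toNat := by
        simp [PySem.List.length_pyRange_one] at h2; omega
      rw [PySem.List.pyGetD_of_nonneg xs d (by omega),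
        List.getD_eq_getElem xs d (by omega)]
      congr 1
      omega

-- reading the mapped index list at an in-range position is looking up the word there
theorem pyGetD_map_in (v2i : List (String × Int)) (xs : List String) (j : Int)
    (h0 : 0 ≤ j) (h1 : j < (xs.length : Int)) :
    PySem.List.pyGetD (xs.map (fun w => pvLookup v2i w)) j 0
    = pvLookup v2i (PySem.List.pyGetD xs j "") := by
  have hj : j.toNat < xs.length := by omega
  rw [PySem.List.pyGetD_of_nonneg _ _ h0, PySem.List.pyGetD_of_nonneg _ _ h0,
      List.getD_eq_getElem _ _ (by simpa using hj), List.getD_eq_getElem _ _ hj,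
      List.getElem_map]

theorem main_eq (textlist : List String) (v2i : List (String × Int)) (window : Int) :
    tokenize_and_preprocess_text textlist v2i window
    = tokenize_and_preprocess_text_alt textlist v2i window := by
  unfold tokenize_and_preprocess_text tokenize_and_preprocess_text_alt
  simp only [List.length_map]
  rw [PySem.List.enumerate_eq_map_pyRange textlist "",
      PySem.List.enumerate_eq_map_pyRange (textlist.map (fun w => pvLookup v2i w)) 0,
      List.foldl_map, List.foldl_map]
  have hlen : PySem.List.len (textlist.map (fun w => pvLookup v2i w)) = PySem.List.len textlist := by
    simp [PySem.List.len]
  rw [hlen]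
  apply PySem.List.foldl_congr_mem'
  intro i hi acc
  rw [PySem.List.mem_pyRange_one] at hi
  obtain ⟨hi0, hin⟩ := hi
  simp only
  rw [innerA]
  set hw := PySem.Int.floordiv window 2 with hhw
  set n : Int := (textlist.length : Int) with hn
  set f := fun w => pvLookup v2i w with hf
  set idx := textlist.map f with hidx
  have hlen' : (idx.length : Int) = n := by simp [hidx, hn]
  have hinn : i < n := by simpa [PySem.List.len] using hin
  by_cases hneg : hw < 0
  · -- negative half-window: the range is empty and both slices are empty
    have hmax0 : max 0 hw = 0 := by omega
    rw [PySem.List.pyRange_one_eq_nil (by omega)]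
    have h1 : PySem.List.slice idx (some (max 0 (i - max 0 hw))) (some i) = [] := by
      rw [hmax0]
      have : max 0 (i - 0) = i := by omega
      rw [this, PySem.List.slice_toNat idx hi0 hi0]
      simp
    have h2 : PySem.List.slice idx (some (i + 1)) (some (min (n - 1) (i + max 0 hw) + 1)) = [] := by
      rw [hmax0]
      have : min (n - 1) (i + 0) = i := by omega
      rw [this, PySem.List.slice_toNat idx (by omega) (by omega)]
      simp
    rw [h1, h2]
    simp
  · -- half-window ≥ 0
    replace hneg : 0 ≤ hw := by omega
    have hmax : max 0 hw = hw := by omega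
    rw [hmax]
    set left := max 0 (i - hw) with hleft
    set right := min (n - 1) (i + hw) with hright
    have hl0 : 0 ≤ left := by omega
    have hli : left ≤ i := by omega
    have hir : i ≤ right := by omega
    have hrn : right ≤ n - 1 := by omega
    rw [PySem.List.pyRange_one_append left i (right + 1) hli (by omega),
        PySem.List.pyRange_one_cons (show i < right + 1 by omega)]
    have hfiltL : (PySem.List.pyRange left i).filter (fun j => !(j == i)) = PySem.List.pyRange left i := by
      rw [List.filter_eq_self]
      intro a ha
      rw [PySem.List.mem_pyRange_one] at ha
      simp; omega
    have hfiltR : (PySem.List.pyRange (i + 1) (right + 1)).filter (fun j => !(j == i)) = PySem.List.pyRange (i + 1) (right + 1) := by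
      rw [List.filter_eq_self]
      intro a ha
      rw [PySem.List.mem_pyRange_one] at ha
      simp; omega
    rw [List.filter_append, List.filter_cons]
    simp only [beq_self_eq_true, Bool.not_true, Bool.false_eq_true, if_false, hfiltL, hfiltR]
    rw [slice_eq_map_pyRange idx left i (0 : Int) hl0 hi0 (by omega),
        slice_eq_map_pyRange idx (i + 1) (min (n - 1) (i + hw) + 1) (0 : Int) (by omega) (by omega) (by omega)]
    rw [← hright, ← List.map_append]
    set js := PySem.List.pyRange left i ++ PySem.List.pyRange (i + 1) (right + 1) with hjs
    have hjsmem : ∀ j ∈ js, 0 ≤ j ∧ j < n := by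
      intro j hj
      rcases List.mem_append.mp hj with h | h <;> rw [PySem.List.mem_pyRange_one] at h <;> omega
    have hmapG : js.map (fun j => pvLookup v2i ((PySem.List.pyGet? textlist j).getD "")) =
        js.map (fun j => PySem.List.pyGetD idx j 0) := by
      apply List.map_congr_left
      intro j hj
      obtain ⟨hj0, hjn⟩ := hjsmem j hj
      rw [pyGetD_map_in v2i textlist j hj0 (by simpa [hn] using hjn)]
      rfl
    have htgt : pvLookup v2i (PySem.List.pyGetD textlist i "") = PySem.List.pyGetD idx i 0 := by
      rw [pyGetD_map_in v2i textlist i hi0 (by simpa [hn] using hinn)]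
    rw [hmapG, htgt]
    congr 1
    rw [List.length_map]
    simp

-- ===== VERDICT (by name: the statement is the Claim_ definition above) =====
theorem tokenize_and_preprocess_text_spec : Claim_equal_tokenize_and_preprocess_text := by
  intro textlist v2i window _ _
  unfold Spec_tokenize_and_preprocess_text
  exact main_eq textlist v2i window
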